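-- pv_equiv track=rewrite | github.com/cc-yangshaoqing/atlasclaw | app/atlasclaw/agent/context_pruning.py | _find_assistant_cutoff_index
-- ===== SOURCE A (Python) =====
-- from typing import Callable, Optional
--
-- def _find_assistant_cutoff_index(messages: list[dict], keep_last_assistants: int) -> Optional[int]:
--     if keep_last_assistants <= 0:
--         return len(messages)
--     remaining = keep_last_assistants
--     for index in range(len(messages) - 1, -1, -1):
--         if str(messages[index].get("role", "")).strip().lower() != "assistant":
--             continue
--         remaining -= 1
--         if remaining == 0:
--             return index
--     return None
-- ===== SOURCE B (Python) =====
-- from typing import Optional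
--
--
-- def _find_assistant_cutoff_index(messages: list[dict], keep_last_assistants: int) -> Optional[int]:
--     idx = [i for i in range(len(messages))
--            if str(messages[i].get("role", "")).strip().lower() == "assistant"]
--     if keep_last_assistants <= 0:
--         return len(messages)
--     if keep_last_assistants > len(idx):
--         return None
--     return idx[-keep_last_assistants]
-- ===== Notes on version B (the rewrite author's own statement) =====
-- stated objective: alternative
-- what changed: Replaces A's reverse countdown loop (decrementing a remaining counter and stopping early) with a single forward pass that materializes the list of assistant-message positions and then selects the Nth-from-last position by index, guarding the keep<=0 and keep>count cases arithmetically.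
import Mathlib
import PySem

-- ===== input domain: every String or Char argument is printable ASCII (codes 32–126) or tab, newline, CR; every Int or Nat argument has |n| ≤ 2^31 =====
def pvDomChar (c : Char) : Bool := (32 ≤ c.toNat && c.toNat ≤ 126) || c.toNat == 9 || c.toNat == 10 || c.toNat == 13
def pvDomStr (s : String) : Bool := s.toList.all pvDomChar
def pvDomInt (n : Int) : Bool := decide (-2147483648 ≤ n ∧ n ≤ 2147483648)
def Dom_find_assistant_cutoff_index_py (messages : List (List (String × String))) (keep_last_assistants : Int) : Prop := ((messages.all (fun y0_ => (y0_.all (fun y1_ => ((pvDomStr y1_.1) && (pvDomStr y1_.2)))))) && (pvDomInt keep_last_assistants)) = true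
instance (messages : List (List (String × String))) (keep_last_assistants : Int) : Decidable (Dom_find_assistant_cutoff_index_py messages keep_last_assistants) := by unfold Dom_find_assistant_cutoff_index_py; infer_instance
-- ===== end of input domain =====

-- B replaces A's reverse countdown over message indices by a forward-built table of
-- assistant positions indexed from the end (objective: alternative decomposition).


-- ===== PORT A =====
-- str(m.get("role", "")).strip().lower()  (str(...) is identity on a string value)
def pvRoleA (m : List (String × String)) : String :=
  PySem.Str.lower (PySem.Str.strip (PySem.Dict.getD (PySem.Dict.mk m) "role" ""))

-- A's countdown loop: for index in range(len-1, -1, -1): … (continue / early return)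
def pvGoA (messages : List (List (String × String))) : List Int → Int → Option Int
  | [], _ => none
  | i :: rest, remaining =>
      if pvRoleA (PySem.List.pyGetD messages i []) ≠ "assistant" then
        pvGoA messages rest remaining
      else if remaining - 1 = 0 then some i
      else pvGoA messages rest (remaining - 1)

def find_assistant_cutoff_index_py (messages : List (List (String × String))) (keep_last_assistants : Int) : Option Int :=
  if keep_last_assistants ≤ 0 then some (messages.length : Int)
  else pvGoA messages (PySem.List.pyRange ((messages.length : Int) - 1) (-1) (-1)) keep_last_assistants

-- ===== PORT B =====
def pvIsAssistantB (m : List (String × String)) : Bool :=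
  PySem.Str.lower (PySem.Str.strip (PySem.Dict.getD (PySem.Dict.mk m) "role" "")) == "assistant"

def find_assistant_cutoff_index_py_alt (messages : List (List (String × String))) (keep_last_assistants : Int) : Option Int :=
  let idx := (PySem.List.pyRange 0 (messages.length : Int) 1).filter
      (fun i => pvIsAssistantB (PySem.List.pyGetD messages i []))
  if keep_last_assistants ≤ 0 then some (messages.length : Int)
  else if keep_last_assistants > (idx.length : Int) then none
  else some (PySem.List.pyGetD idx (-keep_last_assistants) 0)

-- ===== PRECONDITION & SPEC =====
def Spec_find_assistant_cutoff_index_py (messages : List (List (String × String))) (keep_last_assistants : Int) (out : Option Int) : Prop := out = find_assistant_cutoff_index_py_alt messages keep_last_assistants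
instance (messages : List (List (String × String))) (keep_last_assistants : Int) (out : Option Int) : Decidable (Spec_find_assistant_cutoff_index_py messages keep_last_assistants out) := by unfold Spec_find_assistant_cutoff_index_py; infer_instance

-- ===== CLAIM (what is proved, stated in full; the proofs are below) =====
def Claim_equal_find_assistant_cutoff_index_py : Prop := ∀ (messages : List (List (String × String))) (keep_last_assistants : Int), Dom_find_assistant_cutoff_index_py messages keep_last_assistants → Spec_find_assistant_cutoff_index_py messages keep_last_assistants (find_assistant_cutoff_index_py messages keep_last_assistants)

-- ===== LEMMAS AND PROOFS =====

-- A's countdown over any index list picks the (k-1)-st element of the filtered list.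
theorem pvGoA_eq_filter (messages : List (List (String × String))) :
    ∀ (L : List Int) (k : Int), 1 ≤ k →
      pvGoA messages L k =
        (L.filter (fun i => pvIsAssistantB (PySem.List.pyGetD messages i [])))[k.toNat - 1]? := by
  intro L
  induction L with
  | nil => intro k hk; simp [pvGoA]
  | cons i rest ih =>
      intro k hk
      by_cases h : pvRoleA (PySem.List.pyGetD messages i []) = "assistant"
      · have hb : pvIsAssistantB (PySem.List.pyGetD messages i []) = true := by
          simp [pvIsAssistantB, pvRoleA] at h ⊢; exact h
        by_cases hk1 : k = 1
        · subst hk1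
          simp [pvGoA, h, hb]
        · have hk2 : 1 ≤ k - 1 := by omega
          have : pvGoA messages (i :: rest) k = pvGoA messages rest (k - 1) := by
            simp [pvGoA, h]
            omega
          rw [this, ih (k - 1) hk2]
          have hix : k.toNat - 1 = ((k - 1).toNat - 1) + 1 := by omega
          simp only [List.filter_cons, hb, if_true, hix, List.getElem?_cons_succ]
      · have hb : pvIsAssistantB (PySem.List.pyGetD messages i []) = false := by
          simp [pvIsAssistantB, pvRoleA] at h ⊢; exact h
        have : pvGoA messages (i :: rest) k = pvGoA messages rest k := by
          simp [pvGoA, h]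
        rw [this, ih k hk]
        simp [hb]

-- ===== VERDICT (by name: the statement is the Claim_ definition above) =====
theorem find_assistant_cutoff_index_py_spec : Claim_equal_find_assistant_cutoff_index_py := by
  intro messages k _
  unfold Spec_find_assistant_cutoff_index_py
  unfold find_assistant_cutoff_index_py find_assistant_cutoff_index_py_alt
  by_cases hk : k ≤ 0
  · simp [hk]
  · have hk1 : 1 ≤ k := by omega
    simp only [hk, if_false]
    set p := fun i => pvIsAssistantB (PySem.List.pyGetD messages i []) with hp
    have hrev : PySem.List.pyRange ((messages.length : Int) - 1) (-1) (-1)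
        = (PySem.List.pyRange 0 (messages.length : Int) 1).reverse := by
      rw [PySem.List.pyRange_neg_one_eq_reverse]
      norm_num
    rw [pvGoA_eq_filter messages _ k hk1, hrev, List.filter_reverse]
    set idx := (PySem.List.pyRange 0 (messages.length : Int) 1).filter p with hidx
    by_cases hlen : k > (idx.length : Int)
    · have : idx.length ≤ k.toNat - 1 := by omega
      simp [hlen, this]
    · have hkle : k.toNat ≤ idx.length := by omega
      have hkpos : 0 < k.toNat := by omega
      have hlt : k.toNat - 1 < idx.reverse.length := by simp; omega
      rw [List.getElem?_reverse (by simpa using hlt)]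
      have hneg : -k = -((k.toNat : Nat) : Int) := by omega
      rw [hneg, PySem.List.pyGetD_neg_natCast idx k.toNat 0 hkpos hkle]
      have : idx.length - 1 - (k.toNat - 1) = idx.length - k.toNat := by omega
      rw [this, List.getElem?_eq_getElem (by omega)]
      simp [hlen]
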